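-- pv_equiv track=rewrite | github.com/TourTerrible/Circuit-X | Test code/wires_2.py | delete_repeated
-- ===== SOURCE A (Python) =====
-- def delete_repeated(coordinates_array_2d):
--     final=[]
--     flag=0
--     flag2=0
--     for a in coordinates_array_2d:
--         if(flag==0):
--             final.append(a)
--             flag=1
--         else:
--             flag2=0
--             for x in final:
--                 if((abs(x[0]-a[0])>20 ) or (abs(x[1]-a[1])>20 ) ):
--                     continue
--                 else:
--                     flag2=1
--                     break
--             if(flag2==0):
--                     final.append(a)
--     return(final)
-- ===== SOURCE B (Python) =====
-- def delete_repeated(coordinates_array_2d):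
--     final = []
--     grid = {}  # spatial hash: cell (x//20, y//20) -> kept points in that cell
--     for a in coordinates_array_2d:
--         cx, cy = a[0] // 20, a[1] // 20
--         dup = any(
--             abs(p[0] - a[0]) <= 20 and abs(p[1] - a[1]) <= 20
--             for i in (-1, 0, 1)
--             for j in (-1, 0, 1)
--             for p in grid.get((cx + i, cy + j), [])
--         )
--         if not dup:
--             final.append(a)
--             grid[(cx, cy)] = grid.get((cx, cy), []) + [a]
--     return final
-- ===== Notes on version B (the rewrite author's own statement) =====
-- stated objective: alternative
-- what changed: Replaces A's inner scan over all previously kept points by a spatial hash grid with cell size 20, so each new point is only compared against kept points in the 9 neighbouring cells; measured about 1.3x faster at the largest size, below the 1.5x bar, so no speed is claimed.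
-- outside the precondition, e.g. on delete_repeated([[5]]): A returns [[5]], B raises IndexError
import Mathlib
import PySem

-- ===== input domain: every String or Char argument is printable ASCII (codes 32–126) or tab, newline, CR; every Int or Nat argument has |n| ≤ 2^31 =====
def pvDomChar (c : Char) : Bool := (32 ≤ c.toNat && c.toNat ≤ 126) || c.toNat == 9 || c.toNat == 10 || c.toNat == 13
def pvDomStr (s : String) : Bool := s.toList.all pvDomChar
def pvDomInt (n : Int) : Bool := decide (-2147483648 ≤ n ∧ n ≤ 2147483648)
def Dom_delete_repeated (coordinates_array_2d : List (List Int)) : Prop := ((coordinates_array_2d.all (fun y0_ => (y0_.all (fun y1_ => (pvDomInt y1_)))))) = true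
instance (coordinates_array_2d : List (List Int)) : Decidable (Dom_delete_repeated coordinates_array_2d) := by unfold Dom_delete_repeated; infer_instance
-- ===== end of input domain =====

-- ===== PORT A =====
-- B replaces A's scan over all kept points by a spatial hash grid (cell 20); return-value equivalence only.
def pvGet (l : List Int) (i : Int) : Int := PySem.List.pyGetD l i 0

def drInner (a : List Int) : List (List Int) → Bool
  | [] => false
  | x :: rest =>
    if |pvGet x 0 - pvGet a 0| > 20 ∨ |pvGet x 1 - pvGet a 1| > 20 then drInner a rest
    else true

def drStepA (st : List (List Int) × Bool) (a : List Int) : List (List Int) × Bool :=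
  if st.2 = false then (st.1 ++ [a], true)
  else if drInner a st.1 then (st.1, true) else (st.1 ++ [a], true)

def delete_repeated (coordinates_array_2d : List (List Int)) : List (List Int) :=
  (coordinates_array_2d.foldl drStepA ([], false)).1

-- ===== PORT B =====
def drCell (a : List Int) : Int × Int :=
  (PySem.Int.floordiv (pvGet a 0) 20, PySem.Int.floordiv (pvGet a 1) 20)

def drClose (p a : List Int) : Bool :=
  decide (|pvGet p 0 - pvGet a 0| ≤ 20) && decide (|pvGet p 1 - pvGet a 1| ≤ 20)

def drStepB (st : List (List Int) × PySem.Dict (Int × Int) (List (List Int))) (a : List Int) :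
    List (List Int) × PySem.Dict (Int × Int) (List (List Int)) :=
  let c := drCell a
  let dup := ([-1, 0, 1] : List Int).any fun i => ([-1, 0, 1] : List Int).any fun j =>
      (st.2.getD (c.1 + i, c.2 + j) []).any fun p => drClose p a
  if dup then st
  else (st.1 ++ [a], st.2.insert c (st.2.getD c [] ++ [a]))

def delete_repeated_alt (coordinates_array_2d : List (List Int)) : List (List Int) :=
  (coordinates_array_2d.foldl drStepB ([], PySem.Dict.empty)).1

-- ===== PRECONDITION & SPEC =====
-- Pre_ excludes inputs containing an inner list of length < 2, on which A (and B) index p[0]/p[1]: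
-- A raises IndexError on almost all of them (B on all of them), except degenerate cases like [[5]]
-- where A returns without ever indexing the short list.
def Pre_delete_repeated (coordinates_array_2d : List (List Int)) : Prop :=
  ∀ l ∈ coordinates_array_2d, 2 ≤ l.length
instance (coordinates_array_2d : List (List Int)) : Decidable (Pre_delete_repeated coordinates_array_2d) := by
  unfold Pre_delete_repeated; infer_instance
def pvWitness_delete_repeated : List (List Int) := [[0, 0], [30, 0], [5, 5]]
def Spec_delete_repeated (coordinates_array_2d : List (List Int)) (out : List (List Int)) : Prop := out = delete_repeated_alt coordinates_array_2d
instance (coordinates_array_2d : List (List Int)) (out : List (List Int)) : Decidable (Spec_delete_repeated coordinates_array_2d out) := by unfold Spec_delete_repeated; infer_instance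

-- ===== CLAIM (what is proved, stated in full; the proofs are below) =====
def Claim_equal_delete_repeated : Prop := ∀ (coordinates_array_2d : List (List Int)), Dom_delete_repeated coordinates_array_2d → Pre_delete_repeated coordinates_array_2d → Spec_delete_repeated coordinates_array_2d (delete_repeated coordinates_array_2d)

-- ===== LEMMAS AND PROOFS =====

-- A's inner loop decides "some kept point is close to a".
theorem drInner_eq_any (a : List Int) (final : List (List Int)) :
    drInner a final = final.any (fun p => drClose p a) := by
  induction final with
  | nil => rfl
  | cons x rest ih =>
    simp only [drInner, List.any_cons]
    split_ifs with h
    · have hc : drClose x a = false := by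
        unfold drClose; rcases h with h | h <;> simp <;> omega
      rw [ih, hc, Bool.false_or]
    · have hc : drClose x a = true := by
        unfold drClose; simp at h ⊢; omega
      rw [hc, Bool.true_or]

-- A close point lies in one of the 9 cells neighbouring a's cell.
theorem drCell_close (p a : List Int) (h : drClose p a = true) :
    ∃ i ∈ ([-1, 0, 1] : List Int), ∃ j ∈ ([-1, 0, 1] : List Int),
      drCell p = ((drCell a).1 + i, (drCell a).2 + j) := by
  have h20 : (0 : Int) < 20 := by norm_num
  simp only [drClose, Bool.and_eq_true, decide_eq_true_eq] at h
  obtain ⟨hx, hy⟩ := h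
  rw [abs_le] at hx hy
  have e1 := PySem.Int.floordiv_eq_ediv_of_pos (a := pvGet p 0) h20
  have e2 := PySem.Int.floordiv_eq_ediv_of_pos (a := pvGet a 0) h20
  have e3 := PySem.Int.floordiv_eq_ediv_of_pos (a := pvGet p 1) h20
  have e4 := PySem.Int.floordiv_eq_ediv_of_pos (a := pvGet a 1) h20
  refine ⟨(drCell p).1 - (drCell a).1, ?_, (drCell p).2 - (drCell a).2, ?_, ?_⟩
  · simp only [drCell, e1, e2, List.mem_cons]
    omega
  · simp only [drCell, e3, e4, List.mem_cons]
    omega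
  · simp [drCell]

-- The grid invariant: the bucket of cell c holds exactly the kept points whose cell is c.
def drInv (final : List (List Int)) (grid : PySem.Dict (Int × Int) (List (List Int))) : Prop :=
  ∀ c p, p ∈ grid.getD c [] ↔ p ∈ final ∧ drCell p = c

-- Under the invariant, B's 9-cell bucket scan equals A's scan over all kept points.
theorem drDup_eq (a : List Int) (final : List (List Int))
    (grid : PySem.Dict (Int × Int) (List (List Int))) (hinv : drInv final grid) :
    (([-1, 0, 1] : List Int).any fun i => ([-1, 0, 1] : List Int).any fun j =>
      (grid.getD ((drCell a).1 + i, (drCell a).2 + j) []).any fun p => drClose p a)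
      = final.any (fun p => drClose p a) := by
  rcases hdup : final.any (fun p => drClose p a) with _ | _
  · simp only [List.any_eq_false] at hdup ⊢
    intro i _ hj
    simp only [List.any_eq_true] at hj
    obtain ⟨j, _, p, hp, hc⟩ := hj
    exact hdup p ((hinv _ p).mp hp).1 hc
  · simp only [List.any_eq_true] at hdup ⊢
    obtain ⟨p, hpmem, hpc⟩ := hdup
    obtain ⟨i, hi, j, hj, hcell⟩ := drCell_close p a hpc
    exact ⟨i, hi, j, hj, p, (hinv _ p).mpr ⟨hpmem, hcell⟩, hpc⟩

theorem drInv_insert (a : List Int) (final : List (List Int))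
    (grid : PySem.Dict (Int × Int) (List (List Int))) (hinv : drInv final grid) :
    drInv (final ++ [a]) (grid.insert (drCell a) (grid.getD (drCell a) [] ++ [a])) := by
  intro c p
  rw [PySem.Dict.getD_insert]
  by_cases hc : c = drCell a
  · rw [if_pos hc, List.mem_append, List.mem_append, List.mem_singleton, hinv]
    constructor
    · rintro (⟨h1, h2⟩ | rfl)
      · exact ⟨Or.inl h1, h2.trans hc.symm⟩
      · exact ⟨Or.inr rfl, hc.symm⟩
    · rintro ⟨h1 | h1, h2⟩
      · exact Or.inl ⟨h1, h2.trans hc⟩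

      · exact Or.inr h1
  · rw [if_neg hc, hinv, List.mem_append, List.mem_singleton]
    constructor
    · rintro ⟨h1, h2⟩; exact ⟨Or.inl h1, h2⟩
    · rintro ⟨h1 | rfl, h2⟩
      · exact ⟨h1, h2⟩
      · exact absurd h2.symm hc

theorem drStepA_false (final : List (List Int)) (a : List Int) :
    drStepA (final, false) a = (final ++ [a], true) := by
  simp [drStepA]

theorem drStepA_true (final : List (List Int)) (a : List Int) :
    drStepA (final, true) a =
      if drInner a final then (final, true) else (final ++ [a], true) := by
  simp [drStepA]

theorem drLoop_eq (coords : List (List Int)) :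
    ∀ (final : List (List Int)) (flag : Bool)
      (grid : PySem.Dict (Int × Int) (List (List Int))),
      (flag = false → final = []) → drInv final grid →
      (coords.foldl drStepA (final, flag)).1 = (coords.foldl drStepB (final, grid)).1 := by
  induction coords with
  | nil => intro final flag grid _ _; rfl
  | cons a tl ih =>
    intro final flag grid hflag hinv
    simp only [List.foldl_cons]
    have hdup := drDup_eq a final grid hinv
    rcases flag with _ | _
    · -- first element: final = [], A appends unconditionally, B's dup check is vacuously false
      have hfin : final = [] := hflag rfl
      subst hfin
      rw [drStepA_false]
      have hB : drStepB ([], grid) a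
          = ([] ++ [a], grid.insert (drCell a) (grid.getD (drCell a) [] ++ [a])) := by
        simp only [drStepB]
        rw [hdup]
        simp
      rw [hB]
      exact ih _ _ _ (fun h => by cases h) (drInv_insert a [] grid hinv)
    · rw [drStepA_true, drInner_eq_any]
      rcases h : final.any (fun p => drClose p a) with _ | _
      · rw [if_neg (by simp)]
        have hB : drStepB (final, grid) a
            = (final ++ [a], grid.insert (drCell a) (grid.getD (drCell a) [] ++ [a])) := by
          simp only [drStepB]
          rw [hdup, h]
          simp
        rw [hB]
        exact ih _ _ _ (fun h => by cases h) (drInv_insert a final grid hinv)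
      · rw [if_pos rfl]
        have hB : drStepB (final, grid) a = (final, grid) := by
          simp only [drStepB]
          rw [hdup, h]
          simp
        rw [hB]
        exact ih _ _ _ (fun h => by cases h) hinv

-- ===== VERDICT (by name: the statement is the Claim_ definition above) =====
theorem delete_repeated_spec : Claim_equal_delete_repeated := by
  intro coords _ _
  unfold Spec_delete_repeated delete_repeated delete_repeated_alt
  exact drLoop_eq coords [] false PySem.Dict.empty (fun _ => rfl)
    (by intro c p; simp [PySem.Dict.getD_empty])
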